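-- pv_equiv track=rewrite | github.com/DigitallyRefined/android-ip-camera | scripts/generate_fastlane_metadata.py | paragraphs_to_html
-- ===== SOURCE A (Python) =====
-- def paragraphs_to_html(lines):
--     result = []
--     buf = []
--     for line in lines:
--         if not line.strip():
--             if buf:
--                 result.append("<p>" + " ".join(buf).strip() + "</p>")
--                 buf = []
--         else:
--             buf.append(line.strip())
--     if buf:
--         result.append("<p>" + " ".join(buf).strip() + "</p>")
--     return "".join(result)
-- ===== SOURCE B (Python) =====
-- def paragraphs_to_html(lines):
--     # Run-scanning: find each maximal run of non-blank lines up front and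
--     # render it as one paragraph; no running buffer, no flush logic.
--     parts = []
--     rest = list(lines)
--     while rest:
--         if rest[0].strip():
--             k = 1
--             while k < len(rest) and rest[k].strip():
--                 k += 1
--             parts.append("<p>" + " ".join(s.strip() for s in rest[:k]) + "</p>")
--             rest = rest[k:]
--         else:
--             rest = rest[1:]
--     return "".join(parts)
-- ===== Notes on version B (the rewrite author's own statement) =====
-- stated objective: alternative
-- what changed: Replaces A's running-buffer-and-flush accumulator with a run-scanning loop that locates each maximal non-blank run and renders it directly as one paragraph (and drops A's redundant outer .strip() of the joined paragraph).
import Mathlib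
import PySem

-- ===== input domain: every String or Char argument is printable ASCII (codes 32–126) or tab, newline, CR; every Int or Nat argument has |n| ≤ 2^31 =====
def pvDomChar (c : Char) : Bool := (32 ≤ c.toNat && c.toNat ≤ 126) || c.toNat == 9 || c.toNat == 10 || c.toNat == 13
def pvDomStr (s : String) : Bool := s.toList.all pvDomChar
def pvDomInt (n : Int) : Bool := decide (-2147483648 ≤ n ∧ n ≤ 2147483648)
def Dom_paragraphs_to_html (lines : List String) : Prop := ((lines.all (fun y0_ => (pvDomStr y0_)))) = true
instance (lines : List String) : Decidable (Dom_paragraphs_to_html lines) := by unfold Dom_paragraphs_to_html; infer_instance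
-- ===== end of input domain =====

-- B replaces A's running-buffer-and-flush accumulator with a run-scanning loop (alternative decomposition,
-- same return value); neither implementation mutates its argument.

-- ===== PORT A =====
-- A's paragraph string: "<p>" + " ".join(buf).strip() + "</p>"
def pvParaA (buf : List String) : String :=
  "<p>" ++ PySem.Str.strip (PySem.Str.join " " buf) ++ "</p>"

-- the body of A's for-loop, state = (result, buf)
def pvStepA (s : List String × List String) (line : String) : List String × List String :=
  if PySem.Str.strip line = "" then
    (if s.2 ≠ [] then (s.1 ++ [pvParaA s.2], []) else s)
  else
    (s.1, s.2 ++ [PySem.Str.strip line])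

def paragraphs_to_html (lines : List String) : String :=
  let s := lines.foldl pvStepA ([], [])
  PySem.Str.join "" (if s.2 ≠ [] then s.1 ++ [pvParaA s.2] else s.1)

-- ===== PORT B =====
-- inner while: k = 1; while k < len(rest) and rest[k].strip(): k += 1
def pvRunLen (rest : List String) (k : Nat) : Nat :=
  if h : k < rest.length then
    if PySem.Str.strip rest[k] ≠ "" then pvRunLen rest (k + 1) else k
  else k
termination_by rest.length - k

theorem pvRunLen_ge (rest : List String) (k : Nat) : k ≤ pvRunLen rest k := by
  unfold pvRunLen
  split
  · split
    · exact le_trans (Nat.le_succ k) (pvRunLen_ge rest (k + 1))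
    · exact le_refl k
  · exact le_refl k
termination_by rest.length - k

-- outer while over rest, accumulating parts
def pvLoopB (rest : List String) (parts : List String) : List String :=
  match rest with
  | [] => parts
  | x :: xs =>
    if PySem.Str.strip x ≠ "" then
      let k := pvRunLen (x :: xs) 1
      pvLoopB ((x :: xs).drop k)
        (parts ++ ["<p>" ++ PySem.Str.join " " (((x :: xs).take k).map PySem.Str.strip) ++ "</p>"])
    else
      pvLoopB xs parts
termination_by rest.length
decreasing_by
  · have h1 : 1 ≤ pvRunLen (x :: xs) 1 := pvRunLen_ge (x :: xs) 1
    simp only [List.length_drop, List.length_cons]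
    omega
  · simp

def paragraphs_to_html_alt (lines : List String) : String :=
  PySem.Str.join "" (pvLoopB lines [])

-- ===== PRECONDITION & SPEC =====
def Spec_paragraphs_to_html (lines : List String) (out : String) : Prop := out = paragraphs_to_html_alt lines
instance (lines : List String) (out : String) : Decidable (Spec_paragraphs_to_html lines out) := by unfold Spec_paragraphs_to_html; infer_instance

-- ===== CLAIM (what is proved, stated in full; the proofs are below) =====
def Claim_equal_paragraphs_to_html : Prop := ∀ (lines : List String), Dom_paragraphs_to_html lines → Spec_paragraphs_to_html lines (paragraphs_to_html lines)

-- ===== LEMMAS AND PROOFS =====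

-- non-blank test as a Bool predicate
def pvNb (s : String) : Bool := PySem.Str.strip s != ""

-- canonical element-at-a-time description of the paragraph list
def pvCanon (buf : List String) (lines : List String) : List String :=
  match lines with
  | [] => if buf ≠ [] then [pvParaA buf] else []
  | x :: xs =>
    if PySem.Str.strip x = "" then
      if buf ≠ [] then pvParaA buf :: pvCanon [] xs else pvCanon [] xs
    else
      pvCanon (buf ++ [PySem.Str.strip x]) xs

theorem pvA_eq_canon (lines res buf) :
    (let s := lines.foldl pvStepA (res, buf)
     if s.2 ≠ [] then s.1 ++ [pvParaA s.2] else s.1) = res ++ pvCanon buf lines := by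
  induction lines generalizing res buf with
  | nil =>
    simp only [List.foldl_nil, pvCanon]
    split <;> simp_all
  | cons l ls ih =>
    simp only [List.foldl_cons, pvCanon, pvStepA]
    by_cases hb : PySem.Str.strip l = ""
    · by_cases hbuf : buf = []
      · simpa [hb, hbuf] using ih res []
      · have := ih (res ++ [pvParaA buf]) []
        simp [hb, hbuf] at this ⊢
        rw [this]
      -- append associativity handled by simp inside `this`
    · simpa [hb] using ih res (buf ++ [PySem.Str.strip l])

theorem pvRunLen_spec (rest : List String) (k : Nat) (hk : k ≤ rest.length) :
    pvRunLen rest k = k + ((rest.drop k).takeWhile pvNb).length := by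
  by_cases h : k < rest.length
  · have hd : rest.drop k = rest[k] :: rest.drop (k + 1) := List.drop_eq_getElem_cons h
    rw [pvRunLen, hd]
    by_cases hnb : PySem.Str.strip rest[k] = ""
    · have hcons : List.takeWhile pvNb (rest[k] :: rest.drop (k + 1)) = [] := by
        simp [List.takeWhile_cons, pvNb, hnb]
      simp [h, hnb, hcons, pvNb]
    · have hcons : List.takeWhile pvNb (rest[k] :: rest.drop (k + 1)) =
          rest[k] :: List.takeWhile pvNb (rest.drop (k + 1)) := by
        rw [List.takeWhile_cons]
        simp [pvNb, hnb]
      have ih := pvRunLen_spec rest (k + 1) h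
      simp only [h, hnb, dif_pos, ne_eq, not_false_iff, if_pos, hcons, List.length_cons, ih]
      omega
  · have hnil : rest.drop k = [] := List.drop_eq_nil_of_le (by omega)
    rw [pvRunLen]
    simp [h, hnil]
termination_by rest.length - k

theorem pv_drop_takeWhile_len {α : Type} (p : α → Bool) (l : List α) :
    l.drop (l.takeWhile p).length = l.dropWhile p := by
  induction l with
  | nil => simp
  | cons x xs ih =>
    by_cases h : p x <;> simp [List.takeWhile_cons, List.dropWhile_cons, h, ih]

theorem pv_take_takeWhile_len {α : Type} (p : α → Bool) (l : List α) :
    l.take (l.takeWhile p).length = l.takeWhile p := by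
  induction l with
  | nil => simp
  | cons x xs ih =>
    by_cases h : p x <;> simp [List.takeWhile_cons, h, ih]

-- canon absorbs a run of non-blank lines into the buffer
theorem pvCanon_absorb (r : List String) (buf rest : List String)
    (hr : ∀ s ∈ r, pvNb s = true) :
    pvCanon buf (r ++ rest) = pvCanon (buf ++ r.map PySem.Str.strip) rest := by
  induction r generalizing buf with
  | nil => simp
  | cons y ys ih =>
    have hy : PySem.Str.strip y ≠ "" := by
      have := hr y (by simp)
      simpa [pvNb] using this
    simp only [List.cons_append, pvCanon, hy, if_neg hy]
    rw [ih (buf ++ [PySem.Str.strip y]) (fun s hs => hr s (by simp [hs]))]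
    simp

-- flushing a non-empty buffer at a blank (or the end)
theorem pvCanon_flush (rest : List String) (buf : List String) (hbuf : buf ≠ [])
    (hhd : ∀ y ∈ rest.head?, pvNb y = false) :
    pvCanon buf rest = pvParaA buf :: pvCanon [] rest := by
  cases rest with
  | nil => simp [pvCanon, hbuf]
  | cons y ys =>
    have hy : PySem.Str.strip y = "" := by
      have := hhd y (by simp)
      simpa [pvNb] using this
    simp [pvCanon, hy, hbuf]

-- ---- the stripped join needs no further strip ----

theorem pv_lstrip_eq_self (c : Char) (t : List Char) (h : PySem.Chars.isspace c = false) :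
    PySem.Chars.lstrip (c :: t) = c :: t := by
  simp [PySem.Chars.lstrip, List.dropWhile_cons, h]

theorem pv_rstrip_eq_self (cs : List Char) (d : Char) (hd : cs.getLast? = some d)
    (h : PySem.Chars.isspace d = false) : PySem.Chars.rstrip cs = cs := by
  have hrev : cs.reverse.head? = some d := by rw [List.head?_reverse]; exact hd
  cases hcs : cs.reverse with
  | nil => rw [hcs] at hrev; simp at hrev
  | cons e es =>
    rw [hcs] at hrev
    simp only [List.head?_cons, Option.some.injEq] at hrev
    subst hrev
    unfold PySem.Chars.rstrip
    rw [hcs, List.dropWhile_cons, h]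
    simp only [Bool.false_eq_true, if_false]
    rw [← hcs, List.reverse_reverse]

theorem pv_strip_eq_self (l : List Char) (c d : Char) (h1 : l.head? = some c)
    (h2 : PySem.Chars.isspace c = false) (h3 : l.getLast? = some d)
    (h4 : PySem.Chars.isspace d = false) : PySem.Chars.strip l = l := by
  cases l with
  | nil => simp at h1
  | cons x t =>
    simp only [List.head?_cons, Option.some.injEq] at h1
    subst h1
    unfold PySem.Chars.strip
    rw [pv_lstrip_eq_self _ _ h2, pv_rstrip_eq_self _ _ h3 h4]

-- the result of strip never starts with whitespace
theorem pv_strip_head (s : List Char) (c : Char)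
    (h : (PySem.Chars.strip s).head? = some c) : PySem.Chars.isspace c = false := by
  have hpre : PySem.Chars.strip s <+: PySem.Chars.lstrip s := by
    unfold PySem.Chars.strip PySem.Chars.rstrip
    have h1 := List.reverse_prefix.mpr
      (List.dropWhile_suffix (l := (PySem.Chars.lstrip s).reverse) PySem.Chars.isspace)
    rwa [List.reverse_reverse] at h1
  obtain ⟨t, ht⟩ := hpre
  have hls : (PySem.Chars.lstrip s).head? = some c := by
    rw [← ht]
    cases hsp : PySem.Chars.strip s with
    | nil => rw [hsp] at h; simp at h
    | cons a b => rw [hsp] at h; simpa using h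
  have := List.head?_dropWhile_not PySem.Chars.isspace s
  unfold PySem.Chars.lstrip at hls
  rw [hls] at this
  exact this

-- the result of strip never ends with whitespace
theorem pv_strip_last (s : List Char) (d : Char)
    (h : (PySem.Chars.strip s).getLast? = some d) : PySem.Chars.isspace d = false := by
  unfold PySem.Chars.strip PySem.Chars.rstrip at h
  rw [List.getLast?_reverse] at h
  have := List.head?_dropWhile_not PySem.Chars.isspace (PySem.Chars.lstrip s).reverse
  rw [h] at this
  exact this

-- head of a "sep"-joined list is the head of its first (non-empty) part
theorem pv_join_head? (sep : List Char) (p : List Char) (ps : List (List Char)) (hp : p ≠ []) :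
    (PySem.Chars.join sep (p :: ps)).head? = p.head? := by
  cases ps with
  | nil => rw [PySem.Chars.join_singleton]
  | cons q rest =>
    rw [PySem.Chars.join_cons_cons]
    cases hp' : p with
    | nil => exact absurd hp' hp
    | cons a b => simp

-- last of a "sep"-joined list is the last of its last (non-empty) part
theorem pv_join_getLast? (sep q : List Char) (ps : List (List Char)) (hq : q ≠ []) :
    (PySem.Chars.join sep (ps ++ [q])).getLast? = q.getLast? := by
  induction ps with
  | nil => rw [List.nil_append, PySem.Chars.join_singleton]
  | cons p ps' ih =>
    cases hps' : ps' ++ [q] with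
    | nil => simp at hps'
    | cons r rs =>
      rw [List.cons_append, hps', PySem.Chars.join_cons_cons, ← hps',
        List.getLast?_append, ih]
      cases hql : q.getLast? with
      | none => exact absurd (List.getLast?_eq_none_iff.mp hql) hq
      | some v => simp

theorem pv_join_strip_stripped (run : List String) (hne : run ≠ [])
    (hnb : ∀ s ∈ run, pvNb s = true) :
    PySem.Str.strip (PySem.Str.join " " (run.map PySem.Str.strip)) =
      PySem.Str.join " " (run.map PySem.Str.strip) := by
  have hparts : (run.map PySem.Str.strip).map String.toList =
      run.map (fun s => PySem.Chars.strip s.toList) := by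
    rw [List.map_map]
    exact List.map_congr_left (fun s _ => PySem.Str.toList_strip s)
  have hpne : ∀ s ∈ run, PySem.Chars.strip s.toList ≠ [] := by
    intro s hs hc
    have hnbs := hnb s hs
    simp only [pvNb, bne_iff_ne, ne_eq] at hnbs
    apply hnbs
    have h2 : PySem.Str.strip s = String.ofList (PySem.Chars.strip s.toList) := rfl
    rw [h2, hc]
  -- the char-level join
  have hX : (PySem.Str.join " " (run.map PySem.Str.strip)).toList =
      PySem.Chars.join " ".toList (run.map (fun s => PySem.Chars.strip s.toList)) := by
    rw [PySem.Str.toList_join, hparts]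
  obtain ⟨s0, rest, rfl⟩ : ∃ a l, run = a :: l := by
    cases run with
    | nil => exact absurd rfl hne
    | cons a l => exact ⟨a, l, rfl⟩
  -- head is non-space
  have hh0 : ((s0 :: rest).map (fun s => PySem.Chars.strip s.toList)) =
      PySem.Chars.strip s0.toList :: rest.map (fun s => PySem.Chars.strip s.toList) := by simp
  have hhead : ∀ c,
      (PySem.Chars.join " ".toList ((s0 :: rest).map (fun s => PySem.Chars.strip s.toList))).head? = some c →
      PySem.Chars.isspace c = false := by
    intro c hc
    rw [hh0, pv_join_head? _ _ _ (hpne s0 (by simp))] at hc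
    exact pv_strip_head s0.toList c hc
  -- last is non-space
  obtain ⟨ini, sl, hconcat⟩ : ∃ ini x, s0 :: rest = ini ++ [x] := by
    have h := (List.eq_nil_or_concat (s0 :: rest)).resolve_left (by simp)
    simpa [List.concat_eq_append] using h
  have hslmem : sl ∈ s0 :: rest := by rw [hconcat]; simp
  have hlast : ∀ d,
      (PySem.Chars.join " ".toList ((s0 :: rest).map (fun s => PySem.Chars.strip s.toList))).getLast? = some d →
      PySem.Chars.isspace d = false := by
    intro d hd
    rw [hconcat, List.map_append, List.map_singleton,
      pv_join_getLast? _ _ _ (hpne sl hslmem)] at hd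
    exact pv_strip_last sl.toList d hd
  -- the join is non-empty
  have hjne : PySem.Chars.join " ".toList ((s0 :: rest).map (fun s => PySem.Chars.strip s.toList)) ≠ [] := by
    intro hc
    have hhd := pv_join_head? " ".toList (PySem.Chars.strip s0.toList)
      (rest.map (fun s => PySem.Chars.strip s.toList)) (hpne s0 (by simp))
    rw [← hh0, hc] at hhd
    cases h0' : PySem.Chars.strip s0.toList with
    | nil => exact hpne s0 (by simp) h0'
    | cons a b => rw [h0'] at hhd; simp at hhd
  obtain ⟨c, hc⟩ : ∃ c,
      (PySem.Chars.join " ".toList ((s0 :: rest).map (fun s => PySem.Chars.strip s.toList))).head? = some c := by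
    cases hj : PySem.Chars.join " ".toList ((s0 :: rest).map (fun s => PySem.Chars.strip s.toList)) with
    | nil => exact absurd hj hjne
    | cons a b => exact ⟨a, by simp⟩
  obtain ⟨d, hd⟩ : ∃ d,
      (PySem.Chars.join " ".toList ((s0 :: rest).map (fun s => PySem.Chars.strip s.toList))).getLast? = some d := by
    cases hql : (PySem.Chars.join " ".toList ((s0 :: rest).map (fun s => PySem.Chars.strip s.toList))).getLast? with
    | none => exact absurd (List.getLast?_eq_none_iff.mp hql) hjne
    | some v => exact ⟨v, rfl⟩
  have hstrip := pv_strip_eq_self _ c d hc (hhead c hc) hd (hlast d hd)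
  have htl : (PySem.Str.strip (PySem.Str.join " " ((s0 :: rest).map PySem.Str.strip))).toList =
      (PySem.Str.join " " ((s0 :: rest).map PySem.Str.strip)).toList := by
    rw [PySem.Str.toList_strip, hX, hstrip]
  have := congrArg String.ofList htl
  rwa [String.ofList_toList, String.ofList_toList] at this

-- B's loop produces the canonical paragraph list
theorem pvB_eq_canon (rest parts : List String) :
    pvLoopB rest parts = parts ++ pvCanon [] rest := by
  match rest with
  | [] => simp [pvLoopB, pvCanon]
  | x :: xs =>
    by_cases hx : PySem.Str.strip x = ""
    · rw [pvLoopB]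
      simp only [hx, ne_eq, not_true_eq_false, if_false, not_false_iff]
      rw [pvB_eq_canon xs parts]
      simp [pvCanon, hx]
    · rw [pvLoopB]
      simp only [hx, ne_eq, not_false_iff, if_true, if_pos]
      have hk : pvRunLen (x :: xs) 1 = 1 + (xs.takeWhile pvNb).length := by
        have := pvRunLen_spec (x :: xs) 1 (by simp)
        simpa using this
      have htake : (x :: xs).take (pvRunLen (x :: xs) 1) = x :: xs.takeWhile pvNb := by
        rw [hk, Nat.add_comm, List.take_succ_cons, pv_take_takeWhile_len]
      have hdrop : (x :: xs).drop (pvRunLen (x :: xs) 1) = xs.dropWhile pvNb := by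
        rw [hk, Nat.add_comm, List.drop_succ_cons, pv_drop_takeWhile_len]
      rw [htake, hdrop, pvB_eq_canon (xs.dropWhile pvNb)]
      -- now identify the paragraph strings and the canonical tail
      have hrunnb : ∀ s ∈ x :: xs.takeWhile pvNb, pvNb s = true := by
        intro s hs
        rcases List.mem_cons.mp hs with rfl | hs'
        · simp [pvNb, hx]
        · exact List.mem_takeWhile_imp hs'
      have hpara : "<p>" ++ PySem.Str.join " " ((x :: xs.takeWhile pvNb).map PySem.Str.strip) ++ "</p>" =
          pvParaA ((x :: xs.takeWhile pvNb).map PySem.Str.strip) := by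
        unfold pvParaA
        rw [pv_join_strip_stripped _ (by simp) hrunnb]
      have hcanon : pvCanon [] (x :: xs) =
          pvParaA ((x :: xs.takeWhile pvNb).map PySem.Str.strip) :: pvCanon [] (xs.dropWhile pvNb) := by
        have h1 : pvCanon [] (x :: xs) = pvCanon ([] ++ (x :: xs.takeWhile pvNb).map PySem.Str.strip)
            (xs.dropWhile pvNb) := by
          conv_lhs => rw [show (x :: xs) = (x :: xs.takeWhile pvNb) ++ xs.dropWhile pvNb by
            simp [List.takeWhile_append_dropWhile]]
          exact pvCanon_absorb _ _ _ hrunnb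
        rw [h1, List.nil_append]
        refine pvCanon_flush _ _ (by simp) ?_
        intro y hy
        have := List.head?_dropWhile_not pvNb xs
        cases hh : (xs.dropWhile pvNb).head? with
        | none => rw [hh] at hy; simp at hy
        | some z =>
          rw [hh] at hy this
          simp only [Option.mem_def, Option.some.injEq] at hy
          subst hy
          simpa using this
      rw [hcanon, hpara]
      simp
termination_by rest.length
decreasing_by
  · simp
  · have := List.length_dropWhile_le pvNb xs
    simp only [List.length_cons]
    omega

-- ===== VERDICT (by name: the statement is the Claim_ definition above) =====
theorem paragraphs_to_html_spec : Claim_equal_paragraphs_to_html := by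
  intro lines _
  unfold Spec_paragraphs_to_html paragraphs_to_html paragraphs_to_html_alt
  rw [pvB_eq_canon]
  exact congrArg (PySem.Str.join "") (by simpa using pvA_eq_canon lines [] [])
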